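-- pv_equiv track=rewrite | github.com/luizfernandozimmermann/Eery | comandos/Xp.py | obter_xp
-- ===== SOURCE A (Python) =====
-- def obter_xp(level : int):
--     xp = 0
--     xp_requerido = 100
--
--     while level > 0:
--         xp += xp_requerido
--         level -= 1
--         xp_requerido = 5 * (level ** 2) + (50 * level) + 100
--
--     return xp
-- ===== SOURCE B (Python) =====
-- def obter_xp(level: int):
--     if level <= 0:
--         return 0
--     m = level - 1
--     return 100 + 5 * m * (m + 1) * (2 * m + 1) // 6 + 25 * m * (m + 1) + 100 * m
-- ===== Notes on version B (the rewrite author's own statement) =====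
-- stated objective: faster
-- what changed: Replaced the per-level while-loop accumulation with a closed-form polynomial using the sum-of-squares and arithmetic-series formulas.
import Mathlib
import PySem

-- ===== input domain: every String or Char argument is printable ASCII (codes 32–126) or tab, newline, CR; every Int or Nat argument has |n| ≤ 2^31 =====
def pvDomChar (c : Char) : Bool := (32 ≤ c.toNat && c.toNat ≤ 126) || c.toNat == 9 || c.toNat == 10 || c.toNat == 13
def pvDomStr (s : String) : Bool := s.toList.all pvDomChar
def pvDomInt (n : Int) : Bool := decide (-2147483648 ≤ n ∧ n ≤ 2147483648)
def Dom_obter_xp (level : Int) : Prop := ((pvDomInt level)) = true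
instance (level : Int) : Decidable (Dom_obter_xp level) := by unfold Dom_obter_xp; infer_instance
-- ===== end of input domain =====

-- B replaces A's per-level loop by a closed-form polynomial (sum-of-squares formula): O(1) instead of O(level).

-- ===== PORT A =====
-- literal port of A's while-loop: state (level, xp, xp_requerido), one recursive call per iteration
def obterLoop (level xp xp_requerido : Int) : Int :=
  if level > 0 then
    obterLoop (level - 1) (xp + xp_requerido) (5 * (level - 1) ^ 2 + 50 * (level - 1) + 100)
  else xp
termination_by level.toNat
decreasing_by omega

def obter_xp (level : Int) : Int := obterLoop level 0 100

-- ===== PORT B =====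
def obter_xp_alt (level : Int) : Int :=
  if level ≤ 0 then 0
  else
    let m := level - 1
    100 + PySem.Int.floordiv (5 * m * (m + 1) * (2 * m + 1)) 6 + 25 * m * (m + 1) + 100 * m

-- ===== PRECONDITION & SPEC =====
def Spec_obter_xp (level : Int) (out : Int) : Prop := out = obter_xp_alt level
instance (level : Int) (out : Int) : Decidable (Spec_obter_xp level out) := by unfold Spec_obter_xp; infer_instance

-- ===== CLAIM (what is proved, stated in full; the proofs are below) =====
def Claim_equal_obter_xp : Prop := ∀ (level : Int), Dom_obter_xp level → Spec_obter_xp level (obter_xp level)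

-- ===== LEMMAS AND PROOFS =====

-- 6 divides m(m+1)(2m+1), so B's floor division is exact
lemma six_dvd_sq_sum (m : Int) : (6 : Int) ∣ m * (m + 1) * (2 * m + 1) := by
  have h : ∀ x : ZMod 6, x * (x + 1) * (2 * x + 1) = 0 := by decide
  have := h (m : ZMod 6)
  have : ((m * (m + 1) * (2 * m + 1) : Int) : ZMod 6) = 0 := by push_cast; linear_combination this
  exact (ZMod.intCast_zmod_eq_zero_iff_dvd _ 6).mp this

-- the exact quotient: Csum m = Σ_{k=1}^{m} (5k² + 50k + 100) for m ≥ 0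
def Csum (m : Int) : Int := 5 * m * (m + 1) * (2 * m + 1) / 6 + 25 * m * (m + 1) + 100 * m

lemma Csum_step (m : Int) : Csum (m + 1) = Csum m + (5 * (m + 1) ^ 2 + 50 * (m + 1) + 100) := by
  obtain ⟨q, hq⟩ := six_dvd_sq_sum m
  obtain ⟨q', hq'⟩ := six_dvd_sq_sum (m + 1)
  have e1 : 5 * m * (m + 1) * (2 * m + 1) / 6 = 5 * q := by
    rw [show 5 * m * (m + 1) * (2 * m + 1) = 6 * (5 * q) by linear_combination 5 * hq]
    exact Int.mul_ediv_cancel_left _ (by norm_num)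
  have e2 : 5 * (m + 1) * (m + 1 + 1) * (2 * (m + 1) + 1) / 6 = 5 * q' := by
    rw [show 5 * (m + 1) * (m + 1 + 1) * (2 * (m + 1) + 1) = 6 * (5 * q') by linear_combination 5 * hq']
    exact Int.mul_ediv_cancel_left _ (by norm_num)
  have key : q' = q + (m + 1) ^ 2 := by nlinarith [hq, hq']
  simp only [Csum, e1, e2, key]; ring

lemma loop_eq (n : Nat) : ∀ xp req : Int, obterLoop ((n : Int) + 1) xp req = xp + req + Csum n := by
  induction n with
  | zero =>
    intro xp req
    rw [obterLoop, if_pos (by norm_num : ((0 : Nat) : Int) + 1 > 0), obterLoop,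
        if_neg (by norm_num : ¬ ((((0 : Nat) : Int) + 1) - 1 > 0))]
    norm_num [Csum]
  | succ k ih =>
    intro xp req
    have e : ((k + 1 : Nat) : Int) = (k : Int) + 1 := by push_cast; ring
    rw [e, obterLoop, if_pos (by positivity : ((k : Int) + 1 + 1) > 0),
        show ((k : Int) + 1 + 1) - 1 = (k : Int) + 1 from by ring, ih, Csum_step]
    ring

lemma floordiv_eq (m : Int) :
    PySem.Int.floordiv (5 * m * (m + 1) * (2 * m + 1)) 6 = 5 * m * (m + 1) * (2 * m + 1) / 6 :=
  PySem.Int.floordiv_eq_ediv_of_pos (by norm_num)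

-- ===== VERDICT (by name: the statement is the Claim_ definition above) =====
theorem obter_xp_spec : Claim_equal_obter_xp := by
  intro level _
  unfold Spec_obter_xp obter_xp obter_xp_alt
  by_cases h : level ≤ 0
  · rw [obterLoop]
    simp [h, not_lt.mpr h]
  · obtain ⟨n, hn⟩ : ∃ n : Nat, level = (n : Int) + 1 := ⟨(level - 1).toNat, by omega⟩
    subst hn
    rw [if_neg h, show ((n : Int) + 1) - 1 = (n : Int) from by ring,
        loop_eq n 0 100]
    show 0 + 100 + Csum (n : Int) =
      100 + PySem.Int.floordiv (5 * (n : Int) * ((n : Int) + 1) * (2 * (n : Int) + 1)) 6 +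
        25 * (n : Int) * ((n : Int) + 1) + 100 * (n : Int)
    rw [floordiv_eq]
    simp only [Csum]
    ring
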